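-- pv_equiv track=rewrite | github.com/issdandavis/SCBE-AETHERMOORE | scripts/generate_weekly_newsletter.py | categorize_commits
-- ===== SOURCE A (Python) =====
-- def categorize_commits(commits: list[dict]) -> dict[str, list[dict]]:
--     """Group commits by category based on conventional commit prefixes."""
--     categories = {
--         "shipped": [],     # feat
--         "fixed": [],       # fix
--         "research": [],    # docs, research
--         "training": [],    # training, data
--         "infra": [],       # chore, ci, build
--         "other": [],
--     }
--     for c in commits:
--         msg = c["message"].lower()
--         if msg.startswith("feat"):
--             categories["shipped"].append(c)
--         elif msg.startswith("fix"):
--             categories["fixed"].append(c)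
--         elif any(msg.startswith(p) for p in ("docs", "research")):
--             categories["research"].append(c)
--         elif any(k in msg for k in ("training", "dataset", "sft", "model", "kaggle", "huggingface")):
--             categories["training"].append(c)
--         elif any(msg.startswith(p) for p in ("chore", "ci", "build", "refactor")):
--             categories["infra"].append(c)
--         else:
--             categories["other"].append(c)
--     return categories
-- ===== SOURCE B (Python) =====
-- def categorize_commits(commits: list[dict]) -> dict[str, list[dict]]:
--     """Group commits by category via an ordered rules table + filtering."""
--     rules = [
--         ("shipped", lambda m: m.startswith("feat")),
--         ("fixed", lambda m: m.startswith("fix")),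
--         ("research", lambda m: any(m.startswith(p) for p in ("docs", "research"))),
--         ("training", lambda m: any(k in m for k in ("training", "dataset", "sft", "model", "kaggle", "huggingface"))),
--         ("infra", lambda m: any(m.startswith(p) for p in ("chore", "ci", "build", "refactor"))),
--     ]
--
--     def classify(c):
--         msg = c["message"].lower()
--         for cat, pred in rules:
--             if pred(msg):
--                 return cat
--         return "other"
--
--     labels = [classify(c) for c in commits]
--     return {cat: [c for c, lbl in zip(commits, labels) if lbl == cat]
--             for cat in ("shipped", "fixed", "research", "training", "infra", "other")}
-- ===== Notes on version B (the rewrite author's own statement) =====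
-- stated objective: idiomatic
-- what changed: Replaces A's dict-mutating if/elif cascade with a data-driven design: an ordered (category, predicate) rules table, a classify function returning the first matching category, and the result built by filtering the commit list once per category.
import Mathlib
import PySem

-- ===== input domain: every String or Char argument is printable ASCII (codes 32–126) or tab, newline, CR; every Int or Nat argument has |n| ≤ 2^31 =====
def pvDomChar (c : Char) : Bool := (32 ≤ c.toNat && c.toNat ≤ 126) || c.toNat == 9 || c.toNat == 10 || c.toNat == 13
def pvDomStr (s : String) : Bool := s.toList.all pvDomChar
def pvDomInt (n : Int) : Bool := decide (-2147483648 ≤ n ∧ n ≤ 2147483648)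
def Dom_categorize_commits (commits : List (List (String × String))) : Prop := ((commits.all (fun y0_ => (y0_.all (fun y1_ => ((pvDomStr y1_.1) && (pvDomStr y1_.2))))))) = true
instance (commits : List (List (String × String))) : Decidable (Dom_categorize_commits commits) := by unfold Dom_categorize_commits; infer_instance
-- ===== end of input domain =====

-- B is an idiomatic data-driven re-decomposition (rules table + classify + group-by-filter) of A's
-- if/elif cascade that mutates a dict; same cost, proved to return the same value.

-- shared helper: the source line `c["message"].lower()` (both programs contain it verbatim)
def pvMsg (c : List (String × String)) : String :=
  PySem.Str.lower (((PySem.Dict.mk c).get? "message").getD "")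

-- ===== PORT A =====
-- loop body of A's `for c in commits:` (the if/elif cascade appending into the dict)
def categorize_commits_loop (cat : PySem.Dict String (List (List (String × String))))
    (c : List (String × String)) : PySem.Dict String (List (List (String × String))) :=
  if PySem.Str.startswith (pvMsg c) "feat" then cat.modify "shipped" [] (· ++ [c])
  else if PySem.Str.startswith (pvMsg c) "fix" then cat.modify "fixed" [] (· ++ [c])
  else if ["docs", "research"].any (fun p => PySem.Str.startswith (pvMsg c) p) then
    cat.modify "research" [] (· ++ [c])
  else if ["training", "dataset", "sft", "model", "kaggle", "huggingface"].any
      (fun k => PySem.Str.isIn k (pvMsg c)) then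
    cat.modify "training" [] (· ++ [c])
  else if ["chore", "ci", "build", "refactor"].any (fun p => PySem.Str.startswith (pvMsg c) p) then
    cat.modify "infra" [] (· ++ [c])
  else cat.modify "other" [] (· ++ [c])

def categorize_commits (commits : List (List (String × String))) : List (String × List (List (String × String))) :=
  (commits.foldl categorize_commits_loop
    (PySem.Dict.mk [("shipped", []), ("fixed", []), ("research", []), ("training", []), ("infra", []), ("other", [])])).items

-- ===== PORT B =====
-- ordered rules table: first matching predicate names the category
def pvRules : List (String × (String → Bool)) :=
  [("shipped", fun m => PySem.Str.startswith m "feat"),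
   ("fixed", fun m => PySem.Str.startswith m "fix"),
   ("research", fun m => ["docs", "research"].any (fun p => PySem.Str.startswith m p)),
   ("training", fun m => ["training", "dataset", "sft", "model", "kaggle", "huggingface"].any
       (fun k => PySem.Str.isIn k m)),
   ("infra", fun m => ["chore", "ci", "build", "refactor"].any (fun p => PySem.Str.startswith m p))]

def pvClassify (c : List (String × String)) : String :=
  match pvRules.find? (fun r => r.2 (pvMsg c)) with
  | some r => r.1
  | none => "other"

def categorize_commits_alt (commits : List (List (String × String))) : List (String × List (List (String × String))) :=
  ["shipped", "fixed", "research", "training", "infra", "other"].map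
    (fun cat => (cat, commits.filter (fun c => pvClassify c == cat)))

-- ===== PRECONDITION & SPEC =====
-- Pre_ excludes commits lacking a "message" key, on which the Python A raises KeyError.
def Pre_categorize_commits (commits : List (List (String × String))) : Prop :=
  (commits.all (fun c => c.any (fun kv => kv.1 == "message"))) = true
instance (commits : List (List (String × String))) : Decidable (Pre_categorize_commits commits) := by
  unfold Pre_categorize_commits; infer_instance

def pvWitness_categorize_commits : (List (List (String × String))) :=
  [[("message", "feat: add thing")], [("message", "big training run"), ("sha", "abc")]]

def Spec_categorize_commits (commits : List (List (String × String))) (out : List (String × List (List (String × String)))) : Prop := out = categorize_commits_alt commits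
instance (commits : List (List (String × String))) (out : List (String × List (List (String × String)))) : Decidable (Spec_categorize_commits commits out) := by unfold Spec_categorize_commits; infer_instance

-- ===== CLAIM (what is proved, stated in full; the proofs are below) =====
def Claim_equal_categorize_commits : Prop := ∀ (commits : List (List (String × String))), Dom_categorize_commits commits → Pre_categorize_commits commits → Spec_categorize_commits commits (categorize_commits commits)

-- ===== LEMMAS AND PROOFS =====

-- pvClassify, written out as A's branch cascade
lemma pvClassify_eq (c : List (String × String)) :
    pvClassify c =
      if PySem.Str.startswith (pvMsg c) "feat" then "shipped"
      else if PySem.Str.startswith (pvMsg c) "fix" then "fixed"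
      else if ["docs", "research"].any (fun p => PySem.Str.startswith (pvMsg c) p) then "research"
      else if ["training", "dataset", "sft", "model", "kaggle", "huggingface"].any
          (fun k => PySem.Str.isIn k (pvMsg c)) then "training"
      else if ["chore", "ci", "build", "refactor"].any (fun p => PySem.Str.startswith (pvMsg c) p) then "infra"
      else "other" := by
  by_cases h1 : PySem.Str.startswith (pvMsg c) "feat" = true
  · simp_all [pvClassify, pvRules]
  · by_cases h2 : PySem.Str.startswith (pvMsg c) "fix" = true
    · simp_all [pvClassify, pvRules, List.find?]
    · by_cases h3 : (["docs", "research"].any (fun p => PySem.Str.startswith (pvMsg c) p)) = true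
      · simp only [List.any_cons, List.any_nil, Bool.or_false, Bool.or_eq_true] at h3
        rcases h3 with h3 | h3 <;> simp_all [pvClassify, pvRules, List.find?]
      · by_cases h4 : (["training", "dataset", "sft", "model", "kaggle", "huggingface"].any
            (fun k => PySem.Str.isIn k (pvMsg c))) = true
        · simp only [List.any_cons, List.any_nil, Bool.or_false, Bool.or_eq_true] at h4
          rcases h4 with h4 | h4 | h4 | h4 | h4 | h4 <;> simp_all [pvClassify, pvRules, List.find?]
        · by_cases h5 : (["chore", "ci", "build", "refactor"].any
              (fun p => PySem.Str.startswith (pvMsg c) p)) = true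
          · simp only [List.any_cons, List.any_nil, Bool.or_false, Bool.or_eq_true] at h5
            rcases h5 with h5 | h5 | h5 | h5 <;> simp_all [pvClassify, pvRules, List.find?]
          · simp_all [pvClassify, pvRules, List.find?]

lemma pvMod_shipped (a b c d e f : List (List (String × String))) (x : List (String × String)) :
    (PySem.Dict.mk [("shipped", a), ("fixed", b), ("research", c), ("training", d), ("infra", e), ("other", f)]).modify "shipped" [] (· ++ [x])
    = PySem.Dict.mk [("shipped", a ++ [x]), ("fixed", b), ("research", c), ("training", d), ("infra", e), ("other", f)] := by
  simp [PySem.Dict.modify, PySem.Dict.insert, PySem.Dict.getD, PySem.Dict.get?, List.find?]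

lemma pvMod_fixed (a b c d e f : List (List (String × String))) (x : List (String × String)) :
    (PySem.Dict.mk [("shipped", a), ("fixed", b), ("research", c), ("training", d), ("infra", e), ("other", f)]).modify "fixed" [] (· ++ [x])
    = PySem.Dict.mk [("shipped", a), ("fixed", b ++ [x]), ("research", c), ("training", d), ("infra", e), ("other", f)] := by
  simp [PySem.Dict.modify, PySem.Dict.insert, PySem.Dict.getD, PySem.Dict.get?, List.find?]

lemma pvMod_research (a b c d e f : List (List (String × String))) (x : List (String × String)) :
    (PySem.Dict.mk [("shipped", a), ("fixed", b), ("research", c), ("training", d), ("infra", e), ("other", f)]).modify "research" [] (· ++ [x])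
    = PySem.Dict.mk [("shipped", a), ("fixed", b), ("research", c ++ [x]), ("training", d), ("infra", e), ("other", f)] := by
  simp [PySem.Dict.modify, PySem.Dict.insert, PySem.Dict.getD, PySem.Dict.get?, List.find?]

lemma pvMod_training (a b c d e f : List (List (String × String))) (x : List (String × String)) :
    (PySem.Dict.mk [("shipped", a), ("fixed", b), ("research", c), ("training", d), ("infra", e), ("other", f)]).modify "training" [] (· ++ [x])
    = PySem.Dict.mk [("shipped", a), ("fixed", b), ("research", c), ("training", d ++ [x]), ("infra", e), ("other", f)] := by
  simp [PySem.Dict.modify, PySem.Dict.insert, PySem.Dict.getD, PySem.Dict.get?, List.find?]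

lemma pvMod_infra (a b c d e f : List (List (String × String))) (x : List (String × String)) :
    (PySem.Dict.mk [("shipped", a), ("fixed", b), ("research", c), ("training", d), ("infra", e), ("other", f)]).modify "infra" [] (· ++ [x])
    = PySem.Dict.mk [("shipped", a), ("fixed", b), ("research", c), ("training", d), ("infra", e ++ [x]), ("other", f)] := by
  simp [PySem.Dict.modify, PySem.Dict.insert, PySem.Dict.getD, PySem.Dict.get?, List.find?]

lemma pvMod_other (a b c d e f : List (List (String × String))) (x : List (String × String)) :
    (PySem.Dict.mk [("shipped", a), ("fixed", b), ("research", c), ("training", d), ("infra", e), ("other", f)]).modify "other" [] (· ++ [x])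
    = PySem.Dict.mk [("shipped", a), ("fixed", b), ("research", c), ("training", d), ("infra", e), ("other", f ++ [x])] := by
  simp [PySem.Dict.modify, PySem.Dict.insert, PySem.Dict.getD, PySem.Dict.get?, List.find?]

lemma loop_modify (cat : PySem.Dict String (List (List (String × String)))) (c : List (String × String)) :
    categorize_commits_loop cat c = cat.modify (pvClassify c) [] (· ++ [c]) := by
  rw [pvClassify_eq]
  unfold categorize_commits_loop
  split_ifs <;> rfl

lemma pvClassify_cases (c : List (String × String)) :
    pvClassify c = "shipped" ∨ pvClassify c = "fixed" ∨ pvClassify c = "research" ∨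
    pvClassify c = "training" ∨ pvClassify c = "infra" ∨ pvClassify c = "other" := by
  rw [pvClassify_eq]
  split_ifs <;> simp

lemma fold_filter (l : List (List (String × String)))
    (a b c d e f : List (List (String × String))) :
    (l.foldl categorize_commits_loop
      (PySem.Dict.mk [("shipped", a), ("fixed", b), ("research", c), ("training", d), ("infra", e), ("other", f)]))
    = PySem.Dict.mk
        [("shipped", a ++ l.filter (fun x => pvClassify x == "shipped")),
         ("fixed", b ++ l.filter (fun x => pvClassify x == "fixed")),
         ("research", c ++ l.filter (fun x => pvClassify x == "research")),
         ("training", d ++ l.filter (fun x => pvClassify x == "training")),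
         ("infra", e ++ l.filter (fun x => pvClassify x == "infra")),
         ("other", f ++ l.filter (fun x => pvClassify x == "other"))] := by
  induction l generalizing a b c d e f with
  | nil => simp
  | cons x l ih =>
    simp only [List.foldl_cons, List.filter_cons, loop_modify]
    rcases pvClassify_cases x with h | h | h | h | h | h <;>
      simp only [h, pvMod_shipped, pvMod_fixed, pvMod_research, pvMod_training, pvMod_infra,
        pvMod_other] <;>
      rw [ih] <;> simp [List.append_assoc]

-- ===== VERDICT (by name: the statement is the Claim_ definition above) =====
theorem categorize_commits_spec : Claim_equal_categorize_commits := by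
  intro commits _ _
  unfold Spec_categorize_commits categorize_commits categorize_commits_alt
  rw [fold_filter]
  simp
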